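-- pv_equiv track=rewrite | github.com/hiep4hiep/PANW-Bandwidth-quota | pan-quota.py | sum_bytes_ip
-- ===== SOURCE A (Python) =====
-- def sum_bytes_ip(dict):
--     value = list(dict.values())
--     key = list(dict.keys())
--     key_short = []
--     dictsum = {}
--
--     for item in value:
--         if item not in key_short:
--             key_short.append(item)
--             dictsum[item] = int(0)
--
--     for k, v in dictsum.items():
--         for n, i in dict.items():
--             if k == i:
--                 v = int(v) + int(n)
--                 dictsum[k] = v
--
--     return(dictsum)
-- ===== SOURCE B (Python) =====
-- def sum_bytes_ip(dict):
--     # One pass: accumulate the sum of keys directly into a dict keyed by value.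
--     dictsum = {}
--     for k, v in dict.items():
--         dictsum[v] = dictsum.get(v, 0) + k
--     return dictsum
-- ===== Notes on version B (the rewrite author's own statement) =====
-- stated objective: faster
-- what changed: Replaces the dedup pass plus a nested rescan of the whole dict per distinct value with a single pass that accumulates key sums into a dict keyed by value.
import Mathlib
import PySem

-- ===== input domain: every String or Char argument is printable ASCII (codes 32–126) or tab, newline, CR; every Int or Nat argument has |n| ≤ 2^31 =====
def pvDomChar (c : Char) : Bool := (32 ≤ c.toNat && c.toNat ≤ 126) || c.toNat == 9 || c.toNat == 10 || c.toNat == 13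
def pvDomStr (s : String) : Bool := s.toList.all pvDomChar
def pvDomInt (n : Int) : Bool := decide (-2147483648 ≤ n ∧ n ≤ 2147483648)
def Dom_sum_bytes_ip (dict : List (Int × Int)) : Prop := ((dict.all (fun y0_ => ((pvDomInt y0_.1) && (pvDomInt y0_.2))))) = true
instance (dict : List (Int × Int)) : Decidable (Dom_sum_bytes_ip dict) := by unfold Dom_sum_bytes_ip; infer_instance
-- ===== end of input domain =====

-- B replaces A's dedup pass plus per-distinct-value rescan of the whole dict with a single
-- accumulating pass keyed by value; measured asymptotically faster, identical results.


-- ===== PORT A =====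
-- 'for item in value: if item not in key_short: key_short.append(item); dictsum[item] = 0'
def pvAdedupStep (st : List Int × PySem.Dict Int Int) (item : Int) : List Int × PySem.Dict Int Int :=
  if item ∈ st.1 then st else (st.1 ++ [item], st.2.insert item 0)

-- body of 'for n, i in dict.items(): if k == i: v = v + n; dictsum[k] = v' (state = (dictsum, v))
def pvAinnerStep (k : Int) (p : PySem.Dict Int Int × Int) (ni : Int × Int) : PySem.Dict Int Int × Int :=
  if k == ni.2 then (p.1.insert k (p.2 + ni.1), p.2 + ni.1) else p

def sum_bytes_ip (dict : List (Int × Int)) : List (Int × Int) :=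
  let value := dict.map (fun p => p.2)
  let _key := dict.map (fun p => p.1)
  let st := value.foldl pvAdedupStep ([], PySem.Dict.empty)
  let dictsum := st.2
  -- Python iterates the live dictsum.items() view, but each key's value is only modified
  -- during its own iteration, so the snapshot taken here yields the same (k, v) pairs — exact.
  let final := dictsum.items.foldl
    (fun ds kv => (dict.foldl (pvAinnerStep kv.1) (ds, kv.2)).1) dictsum
  final.items

-- ===== PORT B =====
def sum_bytes_ip_alt (dict : List (Int × Int)) : List (Int × Int) :=
  (dict.foldl (fun (d : PySem.Dict Int Int) kv => d.insert kv.2 (d.getD kv.2 0 + kv.1))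
    PySem.Dict.empty).items

-- ===== PRECONDITION & SPEC =====
def Spec_sum_bytes_ip (dict : List (Int × Int)) (out : List (Int × Int)) : Prop := out = sum_bytes_ip_alt dict
instance (dict : List (Int × Int)) (out : List (Int × Int)) : Decidable (Spec_sum_bytes_ip dict out) := by unfold Spec_sum_bytes_ip; infer_instance

-- ===== CLAIM (what is proved, stated in full; the proofs are below) =====
def Claim_equal_sum_bytes_ip : Prop := ∀ (dict : List (Int × Int)), Dom_sum_bytes_ip dict → Spec_sum_bytes_ip dict (sum_bytes_ip dict)

-- ===== LEMMAS AND PROOFS =====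

-- sum of the first components of the entries whose second component is u
def pvSum (l : List (Int × Int)) (u : Int) : Int :=
  ((l.filter (fun p => p.2 == u)).map (fun p => p.1)).sum

lemma pvSum_filter_swap (l : List (Int × Int)) (u : Int) :
    ((l.filter (fun p => u == p.2)).map (fun p => p.1)).sum = pvSum l u := by
  unfold pvSum
  have h : ∀ p : Int × Int, (u == p.2) = (p.2 == u) := by
    intro p
    by_cases h : u = p.2
    · simp [h]
    · have h1 : (u == p.2) = false := by simpa using h
      have h2 : (p.2 == u) = false := by simpa using Ne.symm h
      rw [h1, h2]
  rw [List.filter_congr (fun p _ => h p)]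

lemma B_getD (l : List (Int × Int)) (d : PySem.Dict Int Int) (u : Int) :
    (l.foldl (fun d kv => d.insert kv.2 (d.getD kv.2 0 + kv.1)) d).getD u 0
      = d.getD u 0 + pvSum l u := by
  induction l generalizing d with
  | nil => simp [pvSum]
  | cons p rest ih =>
    simp only [List.foldl_cons, ih]
    by_cases h : p.2 = u
    · simp [pvSum, h]
      ring
    · simp [pvSum, h, PySem.Dict.getD_insert, Ne.symm h]

lemma B_items (dict : List (Int × Int)) :
    sum_bytes_ip_alt dict
      = (PySem.Set.ofList (dict.map (fun p => p.2))).map (fun u => (u, pvSum dict u)) := by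
  unfold sum_bytes_ip_alt
  rw [PySem.Dict.items_eq_map_keys _
    (PySem.Dict.nodup_keys_foldl_insert_key dict (fun kv => kv.2)
      (fun d kv => d.getD kv.2 0 + kv.1) PySem.Dict.empty PySem.Dict.nodup_keys_empty) 0]
  rw [PySem.Dict.keys_foldl_insert_key]
  apply List.map_congr_left
  intro u _
  rw [B_getD]
  simp [PySem.Dict.getD_empty]

lemma inner_spec (l : List (Int × Int)) (k : Int) (ds : PySem.Dict Int Int) (v : Int) :
    l.foldl (pvAinnerStep k) (ds, v)
      = (if l.any (fun p => k == p.2)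
          then ds.insert k (v + ((l.filter (fun p => k == p.2)).map (fun p => p.1)).sum)
          else ds,
         v + ((l.filter (fun p => k == p.2)).map (fun p => p.1)).sum) := by
  induction l generalizing ds v with
  | nil => simp
  | cons p rest ih =>
    simp only [pvAinnerStep, List.foldl_cons, List.any_cons, List.filter_cons]
    by_cases h : (k == p.2) = true
    · simp only [h, if_true, Bool.true_or, List.map_cons, List.sum_cons, ih]
      by_cases hany : rest.any (fun q => k == q.2) = true
      · simp [hany, PySem.Dict.insert_insert_self, add_assoc]
      · have hfalse : rest.any (fun q => k == q.2) = false := Bool.eq_false_iff.mpr hany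
        have hfil : rest.filter (fun q => k == q.2) = [] := by
          rw [List.filter_eq_nil_iff]
          intro q hq
          have := List.any_eq_false.mp hfalse q hq
          simpa using this
        simp [hfalse, hfil]
    · have hb : (k == p.2) = false := Bool.eq_false_iff.mpr h
      simp only [ih]
      rw [hb]
      simp
      rw [Bool.false_or]

-- the inner rescan loop of A, run once per (already present, zero-valued) key of dictsum
lemma phase2 (dict : List (Int × Int)) (P : List (Int × Int)) (d : PySem.Dict Int Int)
    (hcont : ∀ q ∈ P, d.contains q.1 = true)
    (hmem : ∀ q ∈ P, dict.any (fun p => q.1 == p.2) = true)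
    (hzero : ∀ q ∈ P, q.2 = 0) :
    (P.foldl (fun ds kv => (dict.foldl (pvAinnerStep kv.1) (ds, kv.2)).1) d).items
      = d.items.map (fun p => if p.1 ∈ P.map (fun q => q.1)
          then (p.1, ((dict.filter (fun q => p.1 == q.2)).map (fun q => q.1)).sum) else p) := by
  induction P generalizing d with
  | nil => simp
  | cons kv rest ih =>
    simp only [List.foldl_cons]
    have hstep : (dict.foldl (pvAinnerStep kv.1) (d, kv.2)).1
        = d.insert kv.1 (((dict.filter (fun q => kv.1 == q.2)).map (fun q => q.1)).sum) := by
      rw [inner_spec]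
      simp [hmem kv (List.mem_cons_self ..), hzero kv (List.mem_cons_self ..)]
    rw [hstep]
    rw [ih _ (fun q hq => by
        rw [PySem.Dict.contains_insert]
        simp [hcont q (List.mem_cons_of_mem _ hq)])
      (fun q hq => hmem q (List.mem_cons_of_mem _ hq))
      (fun q hq => hzero q (List.mem_cons_of_mem _ hq))]
    rw [PySem.Dict.items_insert_of_contains _ _ (hcont kv (List.mem_cons_self ..)), List.map_map]
    apply List.map_congr_left
    intro p _
    by_cases hpu : p.1 = kv.1
    · by_cases hr : p.1 ∈ rest.map (fun q => q.1) <;>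
        simp [hpu, Function.comp]
    · by_cases hr : p.1 ∈ rest.map (fun q => q.1) <;>
        simp [hpu, hr, Function.comp]

lemma phase1_spec (l : List Int) (s : List Int) (d : PySem.Dict Int Int) (h1 : d.keys = s) :
    (l.foldl pvAdedupStep (s, d)).2.keys = PySem.Set.update s l
      ∧ ∀ u, (l.foldl pvAdedupStep (s, d)).2.getD u 0 = d.getD u 0 := by
  induction l generalizing s d with
  | nil => simpa [PySem.Set.update] using h1
  | cons item rest ih =>
    by_cases hm : item ∈ s
    · have hc : s.contains item = true := by simpa using hm
      simp only [List.foldl_cons, pvAdedupStep, hm, if_true]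
      simpa [PySem.Set.update, PySem.Set.add, hc, hm] using ih s d h1
    · have hc : d.contains item = false := by
        rw [PySem.Dict.contains_eq_decide_mem_keys, h1]; simpa using hm
      have hc' : s.contains item = false := by simpa using hm
      have hk : (d.insert item 0).keys = s ++ [item] := by
        rw [PySem.Dict.keys_insert_of_not_contains _ _ hc, h1]
      obtain ⟨ha, hb⟩ := ih (s ++ [item]) (d.insert item 0) hk
      refine ⟨?_, fun u => ?_⟩
      · simpa [pvAdedupStep, hm, PySem.Set.update, PySem.Set.add, hc'] using ha
      · have hbu := hb u
        simp only [List.foldl_cons, pvAdedupStep, hm, if_false]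
        rw [hbu, PySem.Dict.getD_insert]
        split_ifs with he
        · rw [he, PySem.Dict.getD_of_not_contains _ _ hc]
        · rfl

lemma A_items (dict : List (Int × Int)) :
    sum_bytes_ip dict
      = (PySem.Set.ofList (dict.map (fun p => p.2))).map
          (fun u => (u, ((dict.filter (fun p => u == p.2)).map (fun p => p.1)).sum)) := by
  unfold sum_bytes_ip
  simp only []
  set value := dict.map (fun p => p.2) with hv
  set st := value.foldl pvAdedupStep ([], PySem.Dict.empty) with hst
  obtain ⟨hkeys, hgetD⟩ := phase1_spec value [] PySem.Dict.empty (by simp)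
  rw [← hst] at hkeys hgetD
  have hS : st.2.keys = PySem.Set.ofList value := by
    rw [hkeys]; rfl
  have hnd : st.2.keys.Nodup := by rw [hS]; exact PySem.Set.nodup_ofList value
  have hitems : st.2.items = (PySem.Set.ofList value).map (fun u => (u, (0 : Int))) := by
    rw [PySem.Dict.items_eq_map_keys _ hnd 0, hS]
    apply List.map_congr_left
    intro u _
    rw [hgetD u]
    simp [PySem.Dict.getD_empty]
  have hcont : ∀ q ∈ st.2.items, st.2.contains q.1 = true := by
    intro q hq
    rw [PySem.Dict.contains_eq_decide_mem_keys]
    simp only [decide_eq_true_eq]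
    exact PySem.Dict.mem_keys_of_mem_items _ hq
  have hmem : ∀ q ∈ st.2.items, dict.any (fun p => q.1 == p.2) = true := by
    intro q hq
    rw [hitems] at hq
    obtain ⟨u, hu, rfl⟩ := List.mem_map.mp hq
    have hu' : u ∈ value := by
      have := (PySem.Set.mem_ofList ..).mp hu
      exact this
    rw [hv] at hu'
    obtain ⟨p, hp, hpu⟩ := List.mem_map.mp hu'
    exact List.any_eq_true.mpr ⟨p, hp, by simp [hpu]⟩
  have hzero : ∀ q ∈ st.2.items, q.2 = 0 := by
    intro q hq
    rw [hitems] at hq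
    obtain ⟨u, hu, rfl⟩ := List.mem_map.mp hq
    rfl
  rw [phase2 dict st.2.items st.2 hcont hmem hzero]
  rw [hitems]
  simp only [List.map_map]
  apply List.map_congr_left
  intro u hu
  have hu2 : u ∈ value := (PySem.Set.mem_ofList ..).mp hu
  simp [Function.comp, hu2]

-- ===== VERDICT (by name: the statement is the Claim_ definition above) =====
theorem sum_bytes_ip_spec : Claim_equal_sum_bytes_ip := by
  intro dict _
  unfold Spec_sum_bytes_ip
  rw [A_items, B_items]
  apply List.map_congr_left
  intro u _
  rw [pvSum_filter_swap]
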